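-- pv_equiv track=rewrite | github.com/yonsei-ConU/reminiscence_boj | 2554.py | f
-- ===== SOURCE A (Python) =====
-- def f(x):
--     if x < 10:
--         return [1,1,2,6,4,2,2,4,2,8][x]
--     s = str(x)
--     if int(s[-2]) % 2:
--         return 4 * f(x//5) * f(int(s[-1]))
--     else:
--         return 6 * f(x//5) * f(int(s[-1]))
-- ===== SOURCE B (Python) =====
-- def f(x):
--     table = [1, 1, 2, 6, 4, 2, 2, 4, 2, 8]
--     result = 1
--     while x >= 10:
--         coef = 4 if (x // 10) % 10 % 2 else 6
--         result *= coef * table[x % 10]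
--         x //= 5
--     return result * table[x]
-- ===== Notes on version B (the rewrite author's own statement) =====
-- stated objective: simpler
-- what changed: Replaces A's tail recursion that converts x to a string to read its last two digits with an iterative while loop that keeps a running product and extracts the digits arithmetically via (x//10)%10 and x%10.
-- outside the precondition, e.g. on f(-11): A raises IndexError, B raises IndexError
import Mathlib
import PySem

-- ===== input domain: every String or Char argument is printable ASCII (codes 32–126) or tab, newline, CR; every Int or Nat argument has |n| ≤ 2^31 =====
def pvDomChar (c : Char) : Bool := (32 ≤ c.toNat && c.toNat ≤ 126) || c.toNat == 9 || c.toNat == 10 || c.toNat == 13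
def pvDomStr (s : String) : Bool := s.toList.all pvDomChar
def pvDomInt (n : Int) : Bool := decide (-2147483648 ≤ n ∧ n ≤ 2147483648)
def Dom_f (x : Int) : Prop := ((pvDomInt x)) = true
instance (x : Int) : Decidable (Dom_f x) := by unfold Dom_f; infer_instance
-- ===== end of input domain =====

-- B replaces A's string-based tail recursion by an iterative loop that keeps a running
-- product and extracts digits arithmetically (objective: simpler, same cost).

-- ===== PORT A =====
def pvTableA : List Int := [1, 1, 2, 6, 4, 2, 2, 4, 2, 8]

-- fuel-guarded transliteration of A's recursion (fuel x.toNat+1 is always sufficient;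
-- the 0-fuel / impossible-match defaults are never reached on Pre_).
def fFuel : Nat → Int → Int
  | 0, _ => 0
  | fuel+1, x =>
    if x < 10 then PySem.List.pyGetD pvTableA x 0
    else
      let s := PySem.Int.toChars x
      match PySem.List.pyGet? s (-2), PySem.List.pyGet? s (-1) with
      | some c2, some c1 =>
        match PySem.Int.ofChars? [c2], PySem.Int.ofChars? [c1] with
        | some d2, some d1 =>
          if PySem.Int.mod d2 2 ≠ 0
          then 4 * fFuel fuel (PySem.Int.floordiv x 5) * fFuel fuel d1
          else 6 * fFuel fuel (PySem.Int.floordiv x 5) * fFuel fuel d1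
        | _, _ => 0
      | _, _ => 0

def f (x : Int) : Int := fFuel (x.toNat + 1) x

-- ===== PORT B =====
-- the while loop of Source B, with its running product `result` (table kept inline, as Source B's local list)
def fAltGo (x result : Int) : Int :=
  if 10 ≤ x then
    fAltGo (PySem.Int.floordiv x 5)
      (result * ((if PySem.Int.mod (PySem.Int.mod (PySem.Int.floordiv x 10) 10) 2 ≠ 0 then 4 else (6 : Int))
                  * PySem.List.pyGetD [1, 1, 2, 6, 4, 2, 2, 4, 2, 8] (PySem.Int.mod x 10) 0))
  else result * PySem.List.pyGetD [1, 1, 2, 6, 4, 2, 2, 4, 2, 8] x 0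
termination_by x.toNat
decreasing_by
  have h5 : PySem.Int.floordiv x 5 = x / 5 := PySem.Int.floordiv_eq_ediv_of_pos (by omega)
  omega

def f_alt (x : Int) : Int := fAltGo x 1

-- ===== PRECONDITION & SPEC =====
-- Pre_ excludes x < -10, where both Pythons raise IndexError on the table lookup.
def Pre_f (x : Int) : Prop := -10 ≤ x
instance (x : Int) : Decidable (Pre_f x) := by unfold Pre_f; infer_instance

def pvWitness_f : Int := 2554

def Spec_f (x : Int) (out : Int) : Prop := out = f_alt x
instance (x : Int) (out : Int) : Decidable (Spec_f x out) := by unfold Spec_f; infer_instance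

-- ===== CLAIM (what is proved, stated in full; the proofs are below) =====
def Claim_equal_f : Prop := ∀ (x : Int), Dom_f x → Pre_f x → Spec_f x (f x)

-- ===== LEMMAS AND PROOFS =====

lemma ofChars?_digitChar (d : Nat) (h : d < 10) :
    PySem.Int.ofChars? [Nat.digitChar d] = some (d : Int) := by
  interval_cases d <;> decide

-- last and second-to-last characters of str(x) for x ≥ 10
lemma toChars_pyGet_neg_one (x : Int) (h : 10 ≤ x) :
    PySem.List.pyGet? (PySem.Int.toChars x) (-1)
      = some (Nat.digitChar (x.toNat % 10)) := by
  have hx : ¬ x < 0 := by omega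
  have hm : 10 ≤ x.toNat := by omega
  rw [PySem.Int.toChars, if_neg hx, Nat.toDigits_of_base_le (by norm_num) hm,
    PySem.List.pyGet?_neg_one_append_singleton]

lemma pyGet?_append_pair_neg_two {α : Type} (ys : List α) (a c : α) :
    PySem.List.pyGet? (ys ++ [a, c]) (-2) = some a := by
  have hlen : (ys ++ [a, c]).length = ys.length + 2 := by simp
  rw [PySem.List.pyGet?_neg_ofNat (ys ++ [a, c]) 2 (by omega) (by simp [hlen])]
  simp [hlen]

lemma toChars_pyGet_neg_two (x : Int) (h : 10 ≤ x) :
    PySem.List.pyGet? (PySem.Int.toChars x) (-2)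
      = some (Nat.digitChar (x.toNat / 10 % 10)) := by
  have hx : ¬ x < 0 := by omega
  have hm : 10 ≤ x.toNat := by omega
  rw [PySem.Int.toChars, if_neg hx, Nat.toDigits_of_base_le (by norm_num) hm]
  by_cases h2 : 10 ≤ x.toNat / 10
  · rw [Nat.toDigits_of_base_le (by norm_num) h2, List.append_assoc]
    simpa using pyGet?_append_pair_neg_two (Nat.toDigits 10 (x.toNat / 10 / 10)) _ _
  · rw [Nat.toDigits_of_lt_base (show x.toNat / 10 < 10 by omega),
      show x.toNat / 10 % 10 = x.toNat / 10 from Nat.mod_eq_of_lt (by omega)]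
    simpa using pyGet?_append_pair_neg_two ([] : List Char) _ _

-- loop accumulator factors out
lemma fAltGo_acc_aux (n : Nat) : ∀ (x acc : Int), x.toNat ≤ n → fAltGo x acc = acc * fAltGo x 1 := by
  induction n with
  | zero =>
    intro x acc h
    conv_lhs => rw [fAltGo]
    conv_rhs => rw [fAltGo]
    rw [if_neg (show ¬ (10:Int) ≤ x by omega), if_neg (show ¬ (10:Int) ≤ x by omega)]
    ring
  | succ n ih =>
    intro x acc h
    by_cases hx : 10 ≤ x
    · conv_lhs => rw [fAltGo]
      conv_rhs => rw [fAltGo]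
      rw [if_pos hx, if_pos hx]
      have h5 : PySem.Int.floordiv x 5 = x / 5 := PySem.Int.floordiv_eq_ediv_of_pos (by omega)
      rw [ih _ _ (by omega), ih _ (1 * _) (by omega)]
      ring
    · conv_lhs => rw [fAltGo]
      conv_rhs => rw [fAltGo]
      rw [if_neg hx, if_neg hx]
      ring

lemma fAltGo_acc (x acc : Int) : fAltGo x acc = acc * fAltGo x 1 :=
  fAltGo_acc_aux x.toNat x acc le_rfl

lemma fFuel_base (k : Nat) (y : Int) (h : y < 10) :
    fFuel (k + 1) y = PySem.List.pyGetD pvTableA y 0 := by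
  rw [fFuel, if_pos h]

lemma tableB_eq_tableA : ([1, 1, 2, 6, 4, 2, 2, 4, 2, 8] : List Int) = pvTableA := rfl

lemma fFuel_eq_alt (fuel : Nat) (x : Int) (hpre : -10 ≤ x) (hf : x.toNat < fuel) :
    fFuel fuel x = fAltGo x 1 := by
  induction fuel generalizing x with
  | zero => omega
  | succ fuel ih =>
    by_cases h10 : x < 10
    · rw [fFuel_base _ _ h10]
      conv_rhs => rw [fAltGo]
      rw [if_neg (show ¬ (10:Int) ≤ x by omega), tableB_eq_tableA]
      ring
    · have hx10 : (10 : Int) ≤ x := by omega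
      have hd5 : PySem.Int.floordiv x 5 = x / 5 := PySem.Int.floordiv_eq_ediv_of_pos (by omega)
      rw [fFuel, if_neg h10]
      simp only [toChars_pyGet_neg_one x hx10, toChars_pyGet_neg_two x hx10,
        ofChars?_digitChar _ (Nat.mod_lt _ (by norm_num))]
      -- the recursive calls
      have hsub : fFuel fuel (PySem.Int.floordiv x 5) = fAltGo (PySem.Int.floordiv x 5) 1 :=
        ih _ (by omega) (by omega)
      obtain ⟨k, hk⟩ : ∃ k, fuel = k + 1 := ⟨fuel - 1, by omega⟩
      have hd1 : fFuel fuel ((x.toNat % 10 : Nat) : Int)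
          = PySem.List.pyGetD pvTableA ((x.toNat % 10 : Nat) : Int) 0 := by
        rw [hk]; exact fFuel_base _ _ (by exact_mod_cast Nat.mod_lt _ (by norm_num))
      rw [hsub, hd1]
      -- align the digit arithmetic (x ≥ 0 here)
      have e1 : ((x.toNat / 10 % 10 : Nat) : Int) = x / 10 % 10 := by omega
      have e2 : ((x.toNat % 10 : Nat) : Int) = x % 10 := by omega
      have hd10 : PySem.Int.floordiv x 10 = x / 10 := PySem.Int.floordiv_eq_ediv_of_pos (by omega)
      have hm1 : PySem.Int.mod (x / 10) 10 = x / 10 % 10 :=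
        PySem.Int.mod_eq_emod_of_pos (by norm_num)
      have hm10 : PySem.Int.mod x 10 = x % 10 := PySem.Int.mod_eq_emod_of_pos (by norm_num)
      rw [e1, e2]
      -- unfold one step of the loop on the B side
      conv_rhs => rw [fAltGo]
      rw [if_pos hx10, tableB_eq_tableA, hd10, hm1, hm10]
      conv_rhs => rw [fAltGo_acc]
      split_ifs <;> ring

-- ===== VERDICT (by name: the statement is the Claim_ definition above) =====
theorem f_spec : Claim_equal_f := by
  intro x _ hpre
  unfold Spec_f f f_alt
  exact fFuel_eq_alt _ x hpre (by omega)
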